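-- pv_equiv track=rewrite | github.com/cynthiacai10/algorithm-practice-2025 | contest/delft_2024/d_dialling_digits.py | word_to_num
-- ===== SOURCE A (Python) =====
-- ch_mapping = {
--     "2": {"a", "b", "c"},
--     "3": {"d", "e", "f"},
--     "4": {"g", "h", "i"},
--     "5": {"j", "k", "l"},
--     "6": {"m", "n", "o"},
--     "7": {"p", "q", "r", "s"},
--     "8": {"t", "u", "v"},
--     "9": {"w", "x", "y", "z"}
-- }
--
-- def word_to_num(word):
--     res = ""
--     for ch in word:
--         for num, char_set in ch_mapping.items():
--             if ch in char_set:
--                 res += num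
--                 break
--     return int(res)
-- ===== SOURCE B (Python) =====
-- # B: no keypad table at all -- the digit of each letter is a closed-form arithmetic
-- # function of its alphabet index (groups are 3 wide except pqrs/wxyz, so two offsets
-- # correct for 's' and 'z'); staged generator/comprehension passes replace A's fused
-- # scan-with-break loop, then one int() call (which, like A's, raises on no-letter input).
-- def word_to_num(word):
--     digits = [chr(50 + (k - (k >= 18) - (k >= 25)) // 3)
--               for k in (ord(ch) - 97 for ch in word) if 0 <= k < 26]
--     return int("".join(digits))
-- ===== Notes on version B (the rewrite author's own statement) =====
-- stated objective: alternative
-- what changed: B drops the keypad group table entirely: each letter's digit is a closed-form arithmetic formula on its alphabet index (chr(50 + (k - (k>=18) - (k>=25))//3)), applied in staged generator/filter/map passes instead of A's fused per-character scan over 8 groups with break and string concatenation.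
import Mathlib
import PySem

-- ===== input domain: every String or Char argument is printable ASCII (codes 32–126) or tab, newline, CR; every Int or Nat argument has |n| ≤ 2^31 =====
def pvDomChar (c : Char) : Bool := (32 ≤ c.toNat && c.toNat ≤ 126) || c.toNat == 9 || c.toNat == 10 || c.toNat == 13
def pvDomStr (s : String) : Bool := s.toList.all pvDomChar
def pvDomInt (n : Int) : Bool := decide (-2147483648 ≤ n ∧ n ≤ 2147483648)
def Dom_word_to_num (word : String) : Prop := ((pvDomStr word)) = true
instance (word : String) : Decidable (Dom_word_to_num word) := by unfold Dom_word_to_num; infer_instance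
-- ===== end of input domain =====

-- B drops A's keypad group table and break-on-hit scan: each letter's digit is a
-- closed-form arithmetic formula on its alphabet index, applied in staged
-- generator/filter/map passes before one int() call (objective: alternative).

-- ===== PORT A =====
-- ch_mapping: dict in insertion order; each value a set used only for membership, so a list of its elements is exact
def chMapping : List (String × List Char) :=
  [("2", ['a','b','c']), ("3", ['d','e','f']), ("4", ['g','h','i']),
   ("5", ['j','k','l']), ("6", ['m','n','o']), ("7", ['p','q','r','s']),
   ("8", ['t','u','v']), ("9", ['w','x','y','z'])]

def word_to_num (word : String) : Int :=
  let res := word.toList.foldl (fun res ch =>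
    -- inner 'for num, char_set in ch_mapping.items(): if ch in char_set: res += num; break'
    match chMapping.find? (fun p => p.2.contains ch) with
    | some p => res ++ p.1
    | none => res) ""
  -- int(res); Pre_ excludes the inputs where res is empty and Python raises ValueError
  (PySem.Int.ofStr? res).getD 0

-- ===== PORT B =====
-- the comprehension's filter+map over the staged 'ord(ch) - 97' generator
def bDigit (k : Int) : Option String :=
  if 0 ≤ k && k < 26 then
    -- chr(50 + (k - (k >= 18) - (k >= 25)) // 3)
    some (String.ofList [Char.ofNat (50 + PySem.Int.floordiv
      (k - (if 18 ≤ k then 1 else 0) - (if 25 ≤ k then 1 else 0)) 3).toNat])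
  else none

def word_to_num_alt (word : String) : Int :=
  -- digits = [chr(...) for k in (ord(ch) - 97 for ch in word) if 0 <= k < 26]
  let digits := (word.toList.map (fun ch => ((ch.toNat : Int) - 97))).filterMap bDigit
  -- int("".join(digits)); Pre_ excludes the inputs where the join is empty (ValueError)
  (PySem.Int.ofStr? (PySem.Str.join "" digits)).getD 0

-- ===== PRECONDITION & SPEC =====
-- Pre_ excludes exactly the words with no lowercase letter a..z: there the digit string is
-- empty and A raises ValueError converting '' to int (B's int() raises the same way).
def Pre_word_to_num (word : String) : Prop := (word.toList.any (fun ch => 'a' ≤ ch && ch ≤ 'z')) = true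
instance (word : String) : Decidable (Pre_word_to_num word) := by unfold Pre_word_to_num; infer_instance
def pvWitness_word_to_num : String := "cat"

def Spec_word_to_num (word : String) (out : Int) : Prop := out = word_to_num_alt word
instance (word : String) (out : Int) : Decidable (Spec_word_to_num word out) := by unfold Spec_word_to_num; infer_instance

-- ===== CLAIM (what is proved, stated in full; the proofs are below) =====
def Claim_equal_word_to_num : Prop := ∀ (word : String), Dom_word_to_num word → Pre_word_to_num word → Spec_word_to_num word (word_to_num word)

-- ===== LEMMAS AND PROOFS =====

-- per-character agreement on every char the domain admits (toNat < 127), by enumeration: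
-- A's first-hit group scan names the same digit string as B's closed-form formula
lemma step_eq_lt : ∀ n < 127,
    (chMapping.find? (fun p => p.2.contains (Char.ofNat n))).map Prod.fst
      = bDigit (((Char.ofNat n).toNat : Int) - 97) := by
  decide

lemma step_eq_char (ch : Char) (hd : pvDomChar ch = true) :
    (chMapping.find? (fun p => p.2.contains ch)).map Prod.fst
      = bDigit ((ch.toNat : Int) - 97) := by
  have hlt : ch.toNat < 127 := by
    simp [pvDomChar] at hd; omega
  have := step_eq_lt ch.toNat hlt
  rwa [Char.ofNat_toNat] at this

-- ''.join over a cons, on the List Char side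
lemma join_nil_cons (x : List Char) (xs : List (List Char)) :
    PySem.Chars.join [] (x :: xs) = x ++ PySem.Chars.join [] xs := by
  cases xs <;> simp [PySem.Chars.join, List.intercalate, List.intersperse]

-- the characters of A's accumulated string are those of the join of B's staged passes
lemma fold_eq (l : List Char) (hl : l.all pvDomChar = true) (res : String) :
    (l.foldl (fun res ch =>
      match chMapping.find? (fun p => p.2.contains ch) with
      | some p => res ++ p.1
      | none => res) res).toList
    = res.toList ++ PySem.Chars.join []
        (((l.map (fun ch => ((ch.toNat : Int) - 97))).filterMap bDigit).map String.toList) := by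
  induction l generalizing res with
  | nil => simp [PySem.Chars.join, List.intercalate]
  | cons ch t ih =>
    simp only [List.all_cons, Bool.and_eq_true] at hl
    have hstep := step_eq_char ch hl.1
    cases hA : chMapping.find? (fun p => p.2.contains ch) with
    | none =>
      rw [hA] at hstep
      simp only [List.foldl_cons, hA, List.map_cons, List.filterMap_cons, ← hstep,
        Option.map_none]
      exact ih hl.2 res
    | some p =>
      rw [hA] at hstep
      simp only [List.foldl_cons, hA, List.map_cons, List.filterMap_cons, ← hstep,
        Option.map_some, List.map_cons, join_nil_cons, ih hl.2 (res ++ p.1),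
        String.toList_append, List.append_assoc]

-- ===== VERDICT (by name: the statement is the Claim_ definition above) =====
theorem word_to_num_spec : Claim_equal_word_to_num := by
  intro word hdom _
  unfold Spec_word_to_num word_to_num word_to_num_alt
  have h := fold_eq word.toList hdom ""
  simp only [PySem.Int.ofStr?, PySem.Str.join] at *
  rw [h]
  simp
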